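-- pv_equiv track=rewrite | github.com/A-NextSlide/nextslide | apps/backend/agents/tools/theme/holistic_brand_extractor.py | _combine_colors
-- ===== SOURCE A (Python) =====
-- from typing import List, Dict, Any, Optional, Set
--
-- def _combine_colors(website_colors: List[str], guidelines_colors: List[str]) -> List[str]:
--     """Combine website and guidelines colors, prioritizing website colors."""
--
--     combined = []
--     seen = set()
--
--     # Priority 1: Website colors (most important - actual usage)
--     for color in website_colors:
--         if color.upper() not in seen:
--             combined.append(color)
--             seen.add(color.upper())
--
--     # Priority 2: Guidelines colors (supplementary)
--     for color in guidelines_colors: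
--         if color.upper() not in seen and len(combined) < 15:  # Limit total
--             combined.append(color)
--             seen.add(color.upper())
--
--     return combined[:12]  # Final limit
-- ===== SOURCE B (Python) =====
-- from typing import List
--
-- def _combine_colors(website_colors: List[str], guidelines_colors: List[str]) -> List[str]:
--     """Combine website and guidelines colors, prioritizing website colors."""
--     colors = website_colors + guidelines_colors
--     keys = [c.upper() for c in colors]
--     first = {}
--     for i, k in enumerate(keys):
--         first.setdefault(k, i)
--     out = [c for i, (c, k) in enumerate(zip(colors, keys)) if first[k] == i]
--     return out[:12]
-- ===== Notes on version B (the rewrite author's own statement) =====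
-- stated objective: alternative
-- what changed: A's single stateful pass maintaining a seen-set and a capped accumulator is replaced by a staged first-occurrence-index computation: build the uppercased key list, build a map from each key to its first index with setdefault, then keep element i by the pure test first[keys[i]] == i and slice once to 12 (A's intermediate 15-cap is unobservable under the final [:12]).
import Mathlib
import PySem

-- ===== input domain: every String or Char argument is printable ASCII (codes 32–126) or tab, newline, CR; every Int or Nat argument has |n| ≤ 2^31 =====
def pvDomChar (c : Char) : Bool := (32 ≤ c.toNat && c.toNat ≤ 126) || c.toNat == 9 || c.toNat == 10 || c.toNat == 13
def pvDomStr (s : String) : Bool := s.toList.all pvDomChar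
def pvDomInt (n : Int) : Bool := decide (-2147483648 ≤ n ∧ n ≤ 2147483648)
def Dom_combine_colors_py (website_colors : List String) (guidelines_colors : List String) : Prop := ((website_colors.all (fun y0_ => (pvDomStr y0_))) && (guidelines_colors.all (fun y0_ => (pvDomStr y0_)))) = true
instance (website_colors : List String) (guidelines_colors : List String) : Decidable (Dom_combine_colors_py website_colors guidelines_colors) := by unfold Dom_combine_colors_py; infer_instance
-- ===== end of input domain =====

-- B replaces A's stateful seen-set pass (whose 15-cap is unobservable under the final [:12])
-- by staged passes: build a first-occurrence-index map over the uppercased keys with setdefault,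
-- then keep element i iff first[keys[i]] == i, then one [:12] slice — objective: alternative.


-- ===== PORT A =====
-- A's website step: 'if color.upper() not in seen: append color; add color.upper()'
def pvStep (st : List String × PySem.Set String) (color : String) : List String × PySem.Set String :=
  if PySem.Str.upper color ∉ st.2 then
    (st.1 ++ [color], PySem.Set.add st.2 (PySem.Str.upper color))
  else st

-- A's guidelines step: same test plus 'and len(combined) < 15'
def pvStepCap (st : List String × PySem.Set String) (color : String) : List String × PySem.Set String :=
  if PySem.Str.upper color ∉ st.2 ∧ st.1.length < 15 then
    (st.1 ++ [color], PySem.Set.add st.2 (PySem.Str.upper color))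
  else st

def combine_colors_py (website_colors : List String) (guidelines_colors : List String) : List String :=
  let st1 := website_colors.foldl pvStep ([], PySem.Set.empty)
  let st2 := guidelines_colors.foldl pvStepCap st1
  PySem.List.slice st2.1 none (some 12)

-- ===== PORT B =====
-- colors = ws + gs; keys = [c.upper() for c in colors];
-- first = {}; for i, k in enumerate(keys): first.setdefault(k, i)
-- out = [c for i, (c, k) in enumerate(zip(colors, keys)) if first[k] == i]; return out[:12]
-- (k = keys[i] is always a key of first, so first[k] never raises KeyError; get? == some renders it)
def combine_colors_py_alt (website_colors : List String) (guidelines_colors : List String) : List String :=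
  let colors := website_colors ++ guidelines_colors
  let keys := colors.map PySem.Str.upper
  let first := (PySem.List.enumerate keys 0).foldl
      (fun d p => PySem.Dict.setdefault d p.2 p.1) PySem.Dict.empty
  let out := ((PySem.List.enumerate (colors.zip keys) 0).filter
      (fun q => first.get? q.2.2 == some q.1)).map (fun q => q.2.1)
  PySem.List.slice out none (some 12)

-- ===== PRECONDITION & SPEC =====
def Spec_combine_colors_py (website_colors : List String) (guidelines_colors : List String) (out : List String) : Prop := out = combine_colors_py_alt website_colors guidelines_colors
instance (website_colors : List String) (guidelines_colors : List String) (out : List String) : Decidable (Spec_combine_colors_py website_colors guidelines_colors out) := by unfold Spec_combine_colors_py; infer_instance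

-- ===== CLAIM =====
def Claim_equal_combine_colors_py : Prop := ∀ (website_colors : List String) (guidelines_colors : List String), Dom_combine_colors_py website_colors guidelines_colors → Spec_combine_colors_py website_colors guidelines_colors (combine_colors_py website_colors guidelines_colors)

-- ===== LEMMAS AND PROOFS =====

-- the uncapped fold only ever appends to the accumulated list
theorem pv_full_extends (gs : List String) (st : List String × PySem.Set String) :
    ∃ t, (gs.foldl pvStep st).1 = st.1 ++ t := by
  induction gs generalizing st with
  | nil => exact ⟨[], by simp⟩
  | cons g gs ih =>
    simp only [List.foldl_cons]
    rcases ih (pvStep st g) with ⟨t, ht⟩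
    by_cases hmem : PySem.Str.upper g ∉ st.2
    · refine ⟨g :: t, ?_⟩
      rw [ht]; unfold pvStep; rw [if_pos hmem]; simp
    · refine ⟨t, ?_⟩
      rw [ht]; unfold pvStep; rw [if_neg hmem]

-- once the list has 15 entries the capped loop is frozen
theorem pv_cap_frozen (gs : List String) (st : List String × PySem.Set String)
    (h : 15 ≤ st.1.length) : gs.foldl pvStepCap st = st := by
  induction gs generalizing st with
  | nil => rfl
  | cons g gs ih =>
    simp only [List.foldl_cons]
    have hs : pvStepCap st g = st := by
      unfold pvStepCap; rw [if_neg]; rintro ⟨-, h2⟩; omega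
    rw [hs]; exact ih st h

-- the first 12 entries never depend on the 15-cap
theorem pv_take12 (gs : List String) (st : List String × PySem.Set String) :
    ((gs.foldl pvStepCap st).1).take 12 = ((gs.foldl pvStep st).1).take 12 := by
  induction gs generalizing st with
  | nil => rfl
  | cons g gs ih =>
    simp only [List.foldl_cons]
    by_cases hlen : st.1.length < 15
    · have : pvStepCap st g = pvStep st g := by
        unfold pvStepCap pvStep
        by_cases hmem : PySem.Str.upper g ∉ st.2
        · rw [if_pos ⟨hmem, hlen⟩, if_pos hmem]
        · rw [if_neg (by tauto), if_neg hmem]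
      rw [this]; exact ih (pvStep st g)
    · have hfr : pvStepCap st g = st := by
        unfold pvStepCap; rw [if_neg]; rintro ⟨-, h2⟩; omega
      rw [hfr, pv_cap_frozen gs st (by omega)]
      have hst : pvStep st g = st ∨ ∃ c, pvStep st g = (st.1 ++ [c], PySem.Set.add st.2 (PySem.Str.upper c)) := by
        unfold pvStep; split
        · exact Or.inr ⟨g, rfl⟩
        · exact Or.inl rfl
      rcases pv_full_extends gs (pvStep st g) with ⟨t, ht⟩
      have hpre : ∃ u, (gs.foldl pvStep (pvStep st g)).1 = st.1 ++ u := by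
        rcases hst with h | ⟨c, h⟩
        · exact ⟨t, by rw [ht, h]⟩
        · exact ⟨[c] ++ t, by rw [ht, h, List.append_assoc]⟩
      rcases hpre with ⟨u, hu⟩
      rw [hu, List.take_append_of_le_length (by omega)]

-- proof-only recursive characterization of A's uncapped fold (set-based)
def pvG : List String → PySem.Set String → List String
  | [], _ => []
  | c :: cs, S =>
    if PySem.Str.upper c ∉ S then c :: pvG cs (PySem.Set.add S (PySem.Str.upper c))
    else pvG cs S

-- proof-only recursive characterization of B's filter (prefix-list-based)
def pvH : List String → List String → List String
  | [], _ => []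
  | c :: cs, p =>
    if PySem.Str.upper c ∈ p then pvH cs (p ++ [PySem.Str.upper c])
    else c :: pvH cs (p ++ [PySem.Str.upper c])

theorem pv_fold_G (cs : List String) (acc : List String) (S : PySem.Set String) :
    (cs.foldl pvStep (acc, S)).1 = acc ++ pvG cs S := by
  induction cs generalizing acc S with
  | nil => simp [pvG]
  | cons c cs ih =>
    simp only [List.foldl_cons, pvG]
    by_cases hmem : PySem.Str.upper c ∉ S
    · rw [show pvStep (acc, S) c = (acc ++ [c], PySem.Set.add S (PySem.Str.upper c)) from by
        unfold pvStep; rw [if_pos hmem],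
        ih, if_pos hmem, List.append_assoc]
      rfl
    · rw [show pvStep (acc, S) c = (acc, S) from by unfold pvStep; rw [if_neg hmem],
        ih, if_neg hmem]

theorem pv_G_eq_H (cs : List String) (S : PySem.Set String) (p : List String)
    (h : ∀ x, x ∈ S ↔ x ∈ p) : pvG cs S = pvH cs p := by
  induction cs generalizing S p with
  | nil => rfl
  | cons c cs ih =>
    simp only [pvG, pvH]
    by_cases hp : PySem.Str.upper c ∈ p
    · rw [if_neg (by simp [h, hp]), if_pos hp]
      exact ih S (p ++ [PySem.Str.upper c]) (by intro x; rw [h]; simp; rintro rfl; exact hp)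
    · rw [if_pos (by simp [h, hp]), if_neg hp]
      refine congrArg _ (ih _ _ ?_)
      intro x; rw [PySem.Set.mem_add, h]; simp
-- the setdefault fold records, for each key, the enumerate index of its FIRST occurrence
theorem pv_first (ks : List String) (s : Int) (d : PySem.Dict String Int) (u : String) :
    ((PySem.List.enumerate ks s).foldl
        (fun d p => PySem.Dict.setdefault d p.2 p.1) d).get? u
      = (d.get? u).or ((PySem.List.index? ks u).map (fun n => s + (n : Int))) := by
  induction ks generalizing s d with
  | nil => simp [PySem.List.enumerate_nil, PySem.List.index?_eq_idxOf?]
  | cons k ks ih =>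
    rw [PySem.List.enumerate_cons]
    simp only [List.foldl_cons]
    rw [ih]
    by_cases hu : u = k
    · subst hu
      rw [PySem.Dict.get?_setdefault_self, PySem.List.index?_cons_self]
      cases hdu : d.get? u <;> simp
    · rw [PySem.List.index?_cons_of_ne ks (Ne.symm hu)]
      have hset : (d.setdefault k s).get? u = d.get? u := by
        exact PySem.Dict.get?_setdefault_of_ne d s hu
      rw [hset]
      cases hdu : d.get? u with
      | some v => simp
      | none =>
        cases hidx : PySem.List.index? ks u with
        | none => simp
        | some j => simp; omega

theorem pv_first_spec (K : List String) (u : String) :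
    ((PySem.List.enumerate K 0).foldl
        (fun d p => PySem.Dict.setdefault d p.2 p.1) PySem.Dict.empty).get? u
      = (PySem.List.index? K u).map (fun n => (n : Int)) := by
  rw [pv_first, PySem.Dict.get?_empty, Option.none_or]
  cases PySem.List.index? K u <;> simp

-- the first-occurrence test at index p.length, for K = p ++ u :: rest
theorem pv_cond_mem (K p rest : List String) (u : String) (hK : K = p ++ u :: rest)
    (hu : u ∈ p) :
    ((PySem.List.index? K u).map (fun n => (n : Int)) == some ((p.length : Int))) = false := by
  rw [hK, PySem.List.index?_append_of_mem (u :: rest) hu]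
  rcases (PySem.List.index?_isSome_iff p u).mpr hu |> Option.isSome_iff_exists.mp with ⟨j, hj⟩
  rcases (PySem.List.index?_eq_some_iff p u j).mp hj with ⟨pre, suf, hps, hlen, -⟩
  have hjlt : j < p.length := by
    subst hps; simp [← hlen]
  rw [hj]
  have hne : (j : Int) ≠ (p.length : Int) := by exact_mod_cast Nat.ne_of_lt hjlt
  simp [hne]

theorem pv_cond_not_mem (K p rest : List String) (u : String) (hK : K = p ++ u :: rest)
    (hu : u ∉ p) :
    ((PySem.List.index? K u).map (fun n => (n : Int)) == some ((p.length : Int))) = true := by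
  have : PySem.List.index? K u = some p.length :=
    (PySem.List.index?_eq_some_iff K u p.length).mpr ⟨p, rest, hK, rfl, hu⟩
  rw [this]; simp

theorem pv_B_char (cs : List String) (p : List String) (K : List String)
    (d : PySem.Dict String Int)
    (hd : ∀ u, d.get? u = (PySem.List.index? K u).map (fun n => (n : Int)))
    (hK : K = p ++ cs.map PySem.Str.upper) :
    (((PySem.List.enumerate (cs.zip (cs.map PySem.Str.upper)) (p.length : Int)).filter
        (fun q => d.get? q.2.2 == some q.1)).map
          (fun q => q.2.1))
      = pvH cs p := by
  induction cs generalizing p with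
  | nil => rfl
  | cons c cs ih =>
    simp only [List.map_cons, List.zip_cons_cons, PySem.List.enumerate_cons, List.filter_cons]
    have hKc : K = p ++ PySem.Str.upper c :: cs.map PySem.Str.upper := by
      rw [hK]; rfl
    have hK' : K = (p ++ [PySem.Str.upper c]) ++ cs.map PySem.Str.upper := by
      rw [hKc]; simp
    have hlen : ((p.length : Int) + 1) = ((p ++ [PySem.Str.upper c]).length : Int) := by
      simp
    have ihx := ih (p ++ [PySem.Str.upper c]) hK'
    by_cases hp : PySem.Str.upper c ∈ p
    · rw [show (d.get? ((c, PySem.Str.upper c) : String × String).2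
            == some ((p.length : Int), (c, PySem.Str.upper c)).1) = false from by
          rw [hd]; exact pv_cond_mem K p (cs.map PySem.Str.upper) (PySem.Str.upper c) hKc hp]
      simp only [pvH, if_pos hp]
      rw [hlen]; exact ihx
    · rw [show (d.get? ((c, PySem.Str.upper c) : String × String).2
            == some ((p.length : Int), (c, PySem.Str.upper c)).1) = true from by
          rw [hd]; exact pv_cond_not_mem K p (cs.map PySem.Str.upper) (PySem.Str.upper c) hKc hp]
      simp only [pvH, if_neg hp]
      rw [hlen]; exact congrArg _ ihx

-- ===== VERDICT =====
theorem combine_colors_py_spec : Claim_equal_combine_colors_py := by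
  intro ws gs _
  unfold Spec_combine_colors_py combine_colors_py combine_colors_py_alt
  show PySem.List.slice (gs.foldl pvStepCap (ws.foldl pvStep ([], PySem.Set.empty))).1 none (some ((12:Nat):Int)) = _
  rw [PySem.List.slice_to_natCast]
  have hA : (gs.foldl pvStepCap (ws.foldl pvStep ([], PySem.Set.empty))).1.take 12
      = (pvG (ws ++ gs) PySem.Set.empty).take 12 := by
    have h1 : ws.foldl pvStep ([], PySem.Set.empty)
        = ((ws ++ gs).take ws.length).foldl pvStep ([], PySem.Set.empty) := by
      simp
    rw [pv_take12, ← List.foldl_append, pv_fold_G, List.nil_append]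
  rw [hA]
  have hB := pv_B_char (ws ++ gs) [] ((ws ++ gs).map PySem.Str.upper)
    ((PySem.List.enumerate ((ws ++ gs).map PySem.Str.upper) 0).foldl
        (fun d p => PySem.Dict.setdefault d p.2 p.1) PySem.Dict.empty)
    (fun u => pv_first_spec ((ws ++ gs).map PySem.Str.upper) u) (by simp)
  simp only [List.length_nil, Nat.cast_zero] at hB
  show _ = PySem.List.slice _ none (some ((12:Nat):Int))
  rw [PySem.List.slice_to_natCast, hB,
    pv_G_eq_H (ws ++ gs) PySem.Set.empty [] (by intro x; simp [PySem.Set.empty])]
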